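-- pv_equiv track=rewrite | github.com/RiceWa/Color-Code | txt_to_color.py | pack_bytes_to_pixels
-- ===== SOURCE A (Python) =====
-- def pack_bytes_to_pixels(data):
--     # Convert raw bytes into RGB pixel tuples (3 bytes per pixel)
--     pixels = []
--     for i in range(0, len(data), 3):
--         chunk = data[i:i+3]
--         r = chunk[0] if len(chunk) > 0 else 0
--         g = chunk[1] if len(chunk) > 1 else 0
--         b = chunk[2] if len(chunk) > 2 else 0
--         pixels.append((r, g, b))
--     return pixels
-- ===== SOURCE B (Python) =====
-- def pack_bytes_to_pixels(data):
--     # Single pass over the elements with a mod-3 state machine: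
--     # no index arithmetic, no slicing; flush a padded final pixel at the end.
--     pixels = []
--     r = g = 0
--     k = 0
--     for x in data:
--         if k == 0:
--             r, k = x, 1
--         elif k == 1:
--             g, k = x, 2
--         else:
--             pixels.append((r, g, x))
--             k = 0
--     if k == 1:
--         pixels.append((r, 0, 0))
--     elif k == 2:
--         pixels.append((r, g, 0))
--     return pixels
-- ===== Notes on version B (the rewrite author's own statement) =====
-- stated objective: alternative
-- what changed: Replaced the index/slice loop (range step 3, slice each chunk, guarded indexing into the chunk) by a single element-wise pass with a mod-3 state machine that accumulates r,g and emits a pixel every third element, flushing a zero-padded final pixel.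
import Mathlib
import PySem

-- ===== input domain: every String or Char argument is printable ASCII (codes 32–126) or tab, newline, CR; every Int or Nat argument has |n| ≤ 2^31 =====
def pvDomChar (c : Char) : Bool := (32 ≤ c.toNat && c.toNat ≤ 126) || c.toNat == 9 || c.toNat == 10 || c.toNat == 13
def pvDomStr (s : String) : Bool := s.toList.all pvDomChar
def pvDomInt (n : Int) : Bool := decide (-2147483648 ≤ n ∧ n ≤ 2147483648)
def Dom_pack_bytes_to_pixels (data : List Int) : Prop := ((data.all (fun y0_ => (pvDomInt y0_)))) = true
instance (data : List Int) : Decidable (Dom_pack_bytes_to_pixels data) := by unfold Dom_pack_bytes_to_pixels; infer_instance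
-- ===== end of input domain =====

-- B replaces A's index/slice chunking loop by a single element-wise pass with a
-- mod-3 state machine (same cost, no slicing); proved equal on all inputs.


-- ===== PORT A =====
-- loop body of A: chunk = data[i:i+3]; guarded chunk[0]/chunk[1]/chunk[2] with default 0
def pbpBody (data : List Int) (pixels : List (Int × Int × Int)) (i : Int) : List (Int × Int × Int) :=
  let chunk := PySem.List.slice data (some i) (some (i + 3))
  let r : Int := if 0 < chunk.length then (PySem.List.pyGet? chunk 0).getD 0 else 0
  let g : Int := if 1 < chunk.length then (PySem.List.pyGet? chunk 1).getD 0 else 0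
  let b : Int := if 2 < chunk.length then (PySem.List.pyGet? chunk 2).getD 0 else 0
  pixels ++ [(r, g, b)]

def pack_bytes_to_pixels (data : List Int) : List (Int × Int × Int) :=
  (PySem.List.pyRange 0 (data.length : Int) 3).foldl (pbpBody data) []

-- ===== PORT B =====
-- loop body of B: state (pixels, r, g, k); k counts position mod 3
def pbpStep (s : List (Int × Int × Int) × Int × Int × Int) (x : Int) :
    List (Int × Int × Int) × Int × Int × Int :=
  if s.2.2.2 = 0 then (s.1, x, s.2.2.1, 1)
  else if s.2.2.2 = 1 then (s.1, s.2.1, x, 2)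
  else (s.1 ++ [(s.2.1, s.2.2.1, x)], s.2.1, s.2.2.1, 0)

def pack_bytes_to_pixels_alt (data : List Int) : List (Int × Int × Int) :=
  let s := data.foldl pbpStep ([], 0, 0, 0)
  if s.2.2.2 = 1 then s.1 ++ [(s.2.1, 0, 0)]
  else if s.2.2.2 = 2 then s.1 ++ [(s.2.1, s.2.2.1, 0)]
  else s.1

-- ===== PRECONDITION & SPEC =====
def Spec_pack_bytes_to_pixels (data : List Int) (out : List (Int × Int × Int)) : Prop := out = pack_bytes_to_pixels_alt data
instance (data : List Int) (out : List (Int × Int × Int)) : Decidable (Spec_pack_bytes_to_pixels data out) := by unfold Spec_pack_bytes_to_pixels; infer_instance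

-- ===== CLAIM (what is proved, stated in full; the proofs are below) =====
def Claim_equal_pack_bytes_to_pixels : Prop := ∀ (data : List Int), Dom_pack_bytes_to_pixels data → Spec_pack_bytes_to_pixels data (pack_bytes_to_pixels data)

-- ===== LEMMAS AND PROOFS =====

-- proof-side reference function: the packed pixels, three elements at a time
def pixRef : List Int → List (Int × Int × Int)
  | a :: b :: c :: t => (a, b, c) :: pixRef t
  | [a, b] => [(a, b, 0)]
  | [a] => [(a, 0, 0)]
  | [] => []

-- proof-side name for B's final flush
def flushB (s : List (Int × Int × Int) × Int × Int × Int) : List (Int × Int × Int) :=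
  if s.2.2.2 = 1 then s.1 ++ [(s.2.1, 0, 0)]
  else if s.2.2.2 = 2 then s.1 ++ [(s.2.1, s.2.2.1, 0)]
  else s.1

lemma alt_eq_flushB (data : List Int) :
    pack_bytes_to_pixels_alt data = flushB (data.foldl pbpStep ([], 0, 0, 0)) := rfl

lemma pyRange3_nil (a b : Int) (h : b ≤ a) : PySem.List.pyRange a b 3 = [] := by
  rw [PySem.List.pyRange_of_pos a b (by norm_num)]
  have : ¬ a < b := not_lt.mpr h
  simp [this]

lemma pyRange3_cons (a b : Int) (h : a < b) :
    PySem.List.pyRange a b 3 = a :: PySem.List.pyRange (a + 3) b 3 := by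
  rw [PySem.List.pyRange_of_pos a b (by norm_num), PySem.List.pyRange_of_pos (a+3) b (by norm_num)]
  have hc : (if a < b then ((b - a + 3 - 1) / 3).toNat else 0)
      = (if a + 3 < b then ((b - (a+3) + 3 - 1) / 3).toNat else 0) + 1 := by
    split_ifs <;> omega
  rw [hc, List.range_succ_eq_map]
  simp only [List.map_cons, List.map_map]
  congr 1
  · simp
  · exact List.map_congr_left fun k _ => by simp [Function.comp]; ring

lemma b_loop (t : List Int) : ∀ (pixels : List (Int × Int × Int)) (r0 g0 : Int),
    flushB (t.foldl pbpStep (pixels, r0, g0, 0)) = pixels ++ pixRef t := by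
  induction t using pixRef.induct with
  | case1 a b c t ih =>
      intro pixels r0 g0
      simp only [List.foldl_cons, pbpStep]
      norm_num
      rw [ih]
      simp [pixRef]
  | case2 a b =>
      intro pixels r0 g0
      simp [flushB, pbpStep, pixRef]
  | case3 a =>
      intro pixels r0 g0
      simp [flushB, pbpStep, pixRef]
  | case4 =>
      intro pixels r0 g0
      simp [flushB, pixRef]

lemma a_loop (t : List Int) : ∀ (d : List Int) (i : ℕ) (acc : List (Int × Int × Int)),
    d.drop i = t →
    (PySem.List.pyRange (i : Int) (d.length : Int) 3).foldl (pbpBody d) acc = acc ++ pixRef t := by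
  induction t using pixRef.induct with
  | case1 a b c t ih =>
      intro d i acc hd
      have hlen : i + 3 + t.length = d.length := by
        have := congrArg List.length hd
        simp [List.length_drop] at this
        omega
      have hi : (i : Int) < (d.length : Int) := by exact_mod_cast by omega
      rw [pyRange3_cons _ _ hi]
      have hcast : (i : Int) + 3 = ((i + 3 : ℕ) : Int) := by push_cast; ring
      rw [List.foldl_cons]
      have hbody : pbpBody d acc (i : Int) = acc ++ [(a, b, c)] := by
        unfold pbpBody
        rw [hcast, PySem.List.slice_natCast]
        have : (d.drop i).take ((i + 3) - i) = [a, b, c] := by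
          rw [hd]; simp
        rw [this]
        simp [PySem.List.pyGet?, PySem.List.pyIdx?]
      have hdrop : d.drop (i + 3) = t := by
        have h3 : (d.drop i).drop 3 = t := by rw [hd]; rfl
        rwa [List.drop_drop] at h3
      rw [hcast, ih d (i + 3) _ hdrop, hbody]
      simp [pixRef]
  | case2 a b =>
      intro d i acc hd
      have hlen : i + 2 = d.length := by
        have := congrArg List.length hd
        simp [List.length_drop] at this
        omega
      have hi : (i : Int) < (d.length : Int) := by exact_mod_cast by omega
      rw [pyRange3_cons _ _ hi, List.foldl_cons]
      have hnil : PySem.List.pyRange ((i : Int) + 3) (d.length : Int) 3 = [] := by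
        apply pyRange3_nil; exact_mod_cast by omega
      rw [hnil]
      have hcast : (i : Int) + 3 = ((i + 3 : ℕ) : Int) := by push_cast; ring
      unfold pbpBody
      rw [hcast, PySem.List.slice_natCast]
      have : (d.drop i).take ((i + 3) - i) = [a, b] := by rw [hd]; simp
      rw [this]
      simp [PySem.List.pyGet?, PySem.List.pyIdx?, pixRef]
  | case3 a =>
      intro d i acc hd
      have hlen : i + 1 = d.length := by
        have := congrArg List.length hd
        simp [List.length_drop] at this
        omega
      have hi : (i : Int) < (d.length : Int) := by exact_mod_cast by omega
      rw [pyRange3_cons _ _ hi, List.foldl_cons]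
      have hnil : PySem.List.pyRange ((i : Int) + 3) (d.length : Int) 3 = [] := by
        apply pyRange3_nil; exact_mod_cast by omega
      rw [hnil]
      have hcast : (i : Int) + 3 = ((i + 3 : ℕ) : Int) := by push_cast; ring
      unfold pbpBody
      rw [hcast, PySem.List.slice_natCast]
      have : (d.drop i).take ((i + 3) - i) = [a] := by rw [hd]; simp
      rw [this]
      simp [PySem.List.pyGet?, PySem.List.pyIdx?, pixRef]
  | case4 =>
      intro d i acc hd
      have hlen : d.length ≤ i := by
        have := List.drop_eq_nil_iff.mp hd
        omega
      rw [pyRange3_nil _ _ (by exact_mod_cast hlen)]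
      simp [pixRef]

-- ===== VERDICT (by name: the statement is the Claim_ definition above) =====
theorem pack_bytes_to_pixels_spec : Claim_equal_pack_bytes_to_pixels := by
  intro data _
  unfold Spec_pack_bytes_to_pixels
  have hA : pack_bytes_to_pixels data = pixRef data := by
    unfold pack_bytes_to_pixels
    have := a_loop data data 0 [] (by simp)
    simpa using this
  have hB : pack_bytes_to_pixels_alt data = pixRef data := by
    rw [alt_eq_flushB, b_loop]
    simp
  rw [hA, hB]
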